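-- pv_equiv track=rewrite | github.com/1152024415-crypto/datapallet_dqn | dqn_engine/aod_env_demo.py | _compute_durations
-- ===== SOURCE A (Python) =====
-- from typing import Any, Dict, List, Optional, Tuple
--
-- def _compute_durations(values: List[int]) -> List[int]:
--     durations: List[int] = []
--     prev = None
--     dur = 0
--     for v in values:
--         if prev is None or v != prev:
--             dur = 0
--         else:
--             dur += 1
--         durations.append(dur)
--         prev = v
--     return durations
-- ===== SOURCE B (Python) =====
-- from typing import List
--
-- def _compute_durations(values: List[int]) -> List[int]:
--     # staged: (1) find run-boundary indices, (2) fill a run-start table per interval,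
--     # (3) every answer is index minus its run start
--     n = len(values)
--     starts = [i for i in range(n) if i == 0 or values[i] != values[i - 1]]
--     start_of = [0] * n
--     for s, e in zip(starts, starts[1:] + [n]):
--         for i in range(s, e):
--             start_of[i] = s
--     return [i - start_of[i] for i in range(n)]
-- ===== Notes on version B (the rewrite author's own statement) =====
-- stated objective: alternative
-- what changed: Replaced the single prev/dur counter-carrying pass with staged passes: detect run-boundary indices by adjacent comparison, fill a preallocated run-start table interval by interval, then compute each answer as index minus its run start.
import Mathlib
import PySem

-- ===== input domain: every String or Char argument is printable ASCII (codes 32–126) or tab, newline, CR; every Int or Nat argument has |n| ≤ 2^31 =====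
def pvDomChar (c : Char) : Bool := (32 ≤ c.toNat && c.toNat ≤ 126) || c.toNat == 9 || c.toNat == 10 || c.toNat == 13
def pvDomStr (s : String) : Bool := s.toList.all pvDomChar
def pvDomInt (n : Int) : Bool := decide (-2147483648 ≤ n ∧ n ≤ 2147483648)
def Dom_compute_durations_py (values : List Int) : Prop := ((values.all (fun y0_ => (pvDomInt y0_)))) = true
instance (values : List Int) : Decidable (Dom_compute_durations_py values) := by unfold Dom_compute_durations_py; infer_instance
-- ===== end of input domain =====

-- B replaces the prev/dur counter pass with staged passes (boundary indices, run-start table, index arithmetic); alternative decomposition, same cost.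


-- ===== PORT A =====
-- Literal port of A: one pass carrying (durations, prev, dur); `prev is None` is modelled by Option.
def compute_durations_py (values : List Int) : List Int :=
  (values.foldl (fun (st : List Int × Option Int × Int) v =>
    let durations := st.1
    let prev := st.2.1
    let dur := st.2.2
    let dur := if prev = none ∨ some v ≠ prev then 0 else dur + 1
    (durations ++ [dur], some v, dur)) ([], none, 0)).1

-- ===== PORT B =====
-- Port of B, pass for pass. Python's in-range reads values[i], values[i-1], start_of[i]
-- are ported with getD (exact here: every index used is in range); the comprehension
-- building `starts` is a filter over range(n); the mutating inner fill loop `start_of[i] = s`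
-- is List.set folded over range(s, e) (= List.range' s (e - s)).
def compute_durations_py_alt (values : List Int) : List Int :=
  let n := values.length
  let starts := (List.range n).filter
    (fun i => i == 0 || !(values.getD i 0 == values.getD (i - 1) 0))
  let start_of := (starts.zip (starts.drop 1 ++ [n])).foldl
    (fun so (p : Nat × Nat) =>
      (List.range' p.1 (p.2 - p.1)).foldl (fun so i => so.set i p.1) so)
    (List.replicate n (0 : Nat))
  (List.range n).map (fun (i : Nat) => (i : Int) - ((start_of.getD i 0 : Nat) : Int))

-- ===== PRECONDITION & SPEC =====
def Spec_compute_durations_py (values : List Int) (out : List Int) : Prop := out = compute_durations_py_alt values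
instance (values : List Int) (out : List Int) : Decidable (Spec_compute_durations_py values out) := by unfold Spec_compute_durations_py; infer_instance

-- ===== CLAIM (what is proved, stated in full; the proofs are below) =====
def Claim_equal_compute_durations_py : Prop := ∀ (values : List Int), Dom_compute_durations_py values → Spec_compute_durations_py values (compute_durations_py values)

-- ===== LEMMAS AND PROOFS =====

-- Reference run decomposition: per maximal run of equal values emit 0,1,…,len-1 (proof-only).
def runsF : List Int → List Int
  | [] => []
  | v :: rest =>
    (List.range (1 + (rest.takeWhile (fun w => w == v)).length)).map Int.ofNat
      ++ runsF (rest.dropWhile (fun w => w == v))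
termination_by l => l.length
decreasing_by
  simp
  exact List.length_dropWhile_le _ _

theorem runsF_nil : runsF [] = [] := by unfold runsF; rfl

theorem runsF_cons (v : Int) (rest : List Int) :
    runsF (v :: rest) =
      (List.range (1 + (rest.takeWhile (fun w => w == v)).length)).map Int.ofNat
        ++ runsF (rest.dropWhile (fun w => w == v)) := by
  conv_lhs => unfold runsF

-- ---------- A = runsF ----------

-- A's loop body, zeta-reduced (definitionally equal to the lambda in the port; proof-only).
def stepA (st : List Int × Option Int × Int) (v : Int) : List Int × Option Int × Int :=
  (st.1 ++ [if st.2.1 = none ∨ some v ≠ st.2.1 then 0 else st.2.2 + 1], some v,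
   if st.2.1 = none ∨ some v ≠ st.2.1 then 0 else st.2.2 + 1)

theorem portA_eq (values : List Int) :
    compute_durations_py values = (values.foldl stepA ([], none, 0)).1 := rfl

-- A's counter stream from the second element of a run on, given previous value v and counter d.
def runFrom (v d : Int) : List Int → List Int
  | [] => []
  | w :: ws => if w = v then (d+1) :: runFrom w (d+1) ws else 0 :: runFrom w 0 ws

theorem map_range_shift (n : Nat) (d : Int) :
    (List.range (n+1)).map (fun (i : Nat) => d + (i : Int))
      = d :: (List.range n).map (fun (i : Nat) => d + 1 + (i : Int)) := by
  rw [List.range_succ_eq_map, List.map_cons, List.map_map]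
  refine congrArg₂ _ (by simp) (List.map_congr_left ?_)
  intro i _
  simp [Function.comp]
  ring

theorem loopA_some (l : List Int) : ∀ (acc : List Int) (p d : Int),
    (l.foldl stepA (acc, some p, d)).1 = acc ++ runFrom p d l := by
  induction l with
  | nil => intro acc p d; simp [runFrom]
  | cons w ws ih =>
    intro acc p d
    rw [List.foldl_cons]
    by_cases h : w = p
    · subst h
      have hs : stepA (acc, some w, d) w = (acc ++ [d+1], some w, d+1) := by simp [stepA]
      rw [hs, ih]
      simp [runFrom]
    · have hs : stepA (acc, some p, d) w = (acc ++ [0], some w, 0) := by simp [stepA, h]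
      rw [hs, ih]
      simp [runFrom, h]

theorem runFrom_runs (ws : List Int) : ∀ (v d : Int),
    runFrom v d ws =
      (List.range ((ws.takeWhile (fun w => w == v)).length)).map (fun (i : Nat) => d + 1 + (i : Int))
        ++ runsF (ws.dropWhile (fun w => w == v)) := by
  induction ws with
  | nil => intro v d; simp [runFrom, runsF_nil]
  | cons w ws ih =>
    intro v d
    by_cases h : w = v
    · subst h
      simp only [runFrom, List.takeWhile_cons, List.dropWhile_cons,
        beq_self_eq_true, if_true, List.length_cons]
      rw [map_range_shift, ih w (d+1), List.cons_append]
    · simp only [runFrom, List.takeWhile_cons, List.dropWhile_cons,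
        show (w == v) = false by simp [h]]
      rw [if_neg h]
      simp only [Bool.false_eq_true, if_false, List.length_nil, List.range_zero,
        List.map_nil, List.nil_append]
      rw [runsF_cons, ih w 0, Nat.add_comm 1]
      have hmap : (List.range ((ws.takeWhile (fun x => x == w)).length + 1)).map Int.ofNat
          = (List.range ((ws.takeWhile (fun x => x == w)).length + 1)).map (fun (i : Nat) => (0:Int) + (i : Int)) :=
        List.map_congr_left (fun i _ => by simp)
      rw [hmap, map_range_shift]
      simp

theorem portA_runs (values : List Int) : compute_durations_py values = runsF values := by
  cases values with
  | nil => rw [runsF_nil]; rfl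
  | cons v vs =>
    have hs : stepA ([], none, 0) v = ([0], some v, 0) := by simp [stepA]
    rw [portA_eq, List.foldl_cons, hs, loopA_some, runFrom_runs, runsF_cons, Nat.add_comm 1]
    have hmap : (List.range ((vs.takeWhile (fun w => w == v)).length + 1)).map Int.ofNat
        = (List.range ((vs.takeWhile (fun w => w == v)).length + 1)).map (fun (i : Nat) => (0:Int) + (i : Int)) :=
      List.map_congr_left (fun i _ => by simp)
    rw [hmap, map_range_shift]
    simp

-- ---------- B = runsF ----------

-- Run starts, offset-indexed.
def runStarts (off : Nat) : List Int → List Nat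
  | [] => []
  | v :: rest =>
    off :: runStarts (off + 1 + (rest.takeWhile (fun w => w == v)).length)
      (rest.dropWhile (fun w => w == v))
termination_by l => l.length
decreasing_by
  simp
  exact List.length_dropWhile_le _ _

theorem runStarts_nil (off : Nat) : runStarts off [] = [] := by unfold runStarts; rfl

theorem runStarts_cons (off : Nat) (v : Int) (rest : List Int) :
    runStarts off (v :: rest) =
      off :: runStarts (off + 1 + (rest.takeWhile (fun w => w == v)).length)
        (rest.dropWhile (fun w => w == v)) := by
  conv_lhs => unfold runStarts

-- Cons-structured boundary list: indices i (from off on) where the value differs from its predecessor.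
def bnds (prev : Int) (off : Nat) : List Int → List Nat
  | [] => []
  | w :: ws => (if w == prev then [] else [off]) ++ bnds w (off + 1) ws

theorem bnds_runStarts (ws : List Int) : ∀ (prev : Int) (off : Nat),
    bnds prev off ws
      = runStarts (off + (ws.takeWhile (fun w => w == prev)).length)
          (ws.dropWhile (fun w => w == prev)) := by
  induction ws with
  | nil => intro prev off; simp [bnds, runStarts_nil]
  | cons w ws ih =>
    intro prev off
    by_cases h : w = prev
    · subst h
      simp only [bnds, beq_self_eq_true, if_true, List.nil_append,
        List.takeWhile_cons, List.dropWhile_cons, List.length_cons]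
      rw [ih w (off + 1)]
      ring_nf
    · simp only [bnds, show (w == prev) = false by simp [h], Bool.false_eq_true, if_false,
        List.takeWhile_cons, List.dropWhile_cons, List.singleton_append,
        List.length_nil, Nat.add_zero]
      rw [runStarts_cons, ih w (off + 1)]

-- The filtered-range boundary computation equals bnds, given the already-scanned prefix.
theorem filter_range'_bnds (ws : List Int) : ∀ (pre : List Int) (prev : Int),
    pre.getLast? = some prev →
    (List.range' pre.length ws.length).filter
        (fun i => !((pre ++ ws).getD i 0 == (pre ++ ws).getD (i - 1) 0))
      = bnds prev pre.length ws := by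
  induction ws with
  | nil => intro pre prev _; simp [bnds]
  | cons w ws ih =>
    intro pre prev hlast
    have hpre : pre ≠ [] := by
      intro h; rw [h] at hlast; simp at hlast
    have hlen : 1 ≤ pre.length := by
      cases pre with
      | nil => exact absurd rfl hpre
      | cons a l => simp
    simp only [List.length_cons]
    rw [List.range'_succ, List.filter_cons]
    have hget1 : (pre ++ w :: ws).getD pre.length 0 = w := by
      rw [List.getD_eq_getElem?_getD, List.getElem?_append_right (le_refl _)]
      simp
    have hget0 : (pre ++ w :: ws).getD (pre.length - 1) 0 = prev := by
      rw [List.getD_eq_getElem?_getD, List.getElem?_append_left (by omega)]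
      rw [List.getLast?_eq_getElem?] at hlast
      simp [hlast]
    have hrec : (List.range' (pre.length + 1) ws.length).filter
        (fun i => !((pre ++ w :: ws).getD i 0 == (pre ++ w :: ws).getD (i - 1) 0))
        = bnds w (pre.length + 1) ws := by
      have h1 : pre ++ w :: ws = (pre ++ [w]) ++ ws := by simp
      have h2 : (pre ++ [w]).length = pre.length + 1 := by simp
      have := ih (pre ++ [w]) w (by simp)
      rw [h2, ← h1] at this
      exact this
    rw [hget1, hget0, hrec]
    by_cases h : w = prev
    · simp [bnds, h]
    · simp [bnds, show (w == prev) = false by simp [h]]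

-- `starts` of the port equals runStarts 0.
theorem starts_eq (values : List Int) :
    (List.range values.length).filter
        (fun i => i == 0 || !(values.getD i 0 == values.getD (i - 1) 0))
      = runStarts 0 values := by
  cases values with
  | nil => simp [runStarts_nil]
  | cons v rest =>
    have hr : List.range (v :: rest).length = 0 :: List.range' 1 rest.length := by
      rw [List.range_eq_range', List.length_cons, List.range'_succ]
    rw [hr, List.filter_cons]
    simp only [beq_self_eq_true, Bool.true_or, if_true]
    have hcong : (List.range' 1 rest.length).filter
          (fun i => i == 0 || !((v :: rest).getD i 0 == (v :: rest).getD (i - 1) 0))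
        = (List.range' 1 rest.length).filter
          (fun i => !((v :: rest).getD i 0 == (v :: rest).getD (i - 1) 0)) := by
      apply List.filter_congr
      intro i hi
      have : 1 ≤ i := (List.mem_range'_1.mp hi).1
      have : (i == 0) = false := by simp; omega
      simp [this]
    rw [hcong]
    have hb := filter_range'_bnds rest [v] v (by simp)
    simp only [List.length_cons, List.length_nil, Nat.zero_add, List.singleton_append] at hb
    rw [hb, bnds_runStarts, runStarts_cons]

-- Run-start table: per run of length L starting at off, L copies of off.
def stOf (off : Nat) : List Int → List Nat
  | [] => []
  | v :: rest =>
    List.replicate (1 + (rest.takeWhile (fun w => w == v)).length) off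
      ++ stOf (off + 1 + (rest.takeWhile (fun w => w == v)).length)
        (rest.dropWhile (fun w => w == v))
termination_by l => l.length
decreasing_by
  simp
  exact List.length_dropWhile_le _ _

theorem stOf_nil (off : Nat) : stOf off [] = [] := by unfold stOf; rfl

theorem stOf_cons (off : Nat) (v : Int) (rest : List Int) :
    stOf off (v :: rest) =
      List.replicate (1 + (rest.takeWhile (fun w => w == v)).length) off
        ++ stOf (off + 1 + (rest.takeWhile (fun w => w == v)).length)
          (rest.dropWhile (fun w => w == v)) := by
  conv_lhs => unfold stOf

-- Filling positions [s, s+k) of a list with x.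
theorem fill_eq (k : Nat) : ∀ (so : List Nat) (s x : Nat), s + k ≤ so.length →
    (List.range' s k).foldl (fun so i => so.set i x) so
      = so.take s ++ List.replicate k x ++ so.drop (s + k) := by
  induction k with
  | zero => intro so s x _; simp
  | succ k ih =>
    intro so s x hle
    rw [List.range'_succ, List.foldl_cons, ih (so.set s x) (s + 1) x (by simp; omega)]
    have hs : s < so.length := by omega
    have h1 : (so.set s x).take (s + 1) = so.take s ++ [x] := by
      rw [List.set_eq_take_append_cons_drop, if_pos hs, List.take_append]
      simp [Nat.min_eq_left (le_of_lt hs)]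
    have h2 : (so.set s x).drop (s + 1 + k) = so.drop (s + (k + 1)) := by
      rw [List.drop_set, if_pos (by omega)]
      congr 1
      ring
    rw [h1, h2]
    simp [List.replicate_succ]

theorem runStarts_eq_nil_iff (off : Nat) (l : List Int) :
    runStarts off l = [] ↔ l = [] := by
  cases l with
  | nil => simp [runStarts_nil]
  | cons v rest => rw [runStarts_cons]; simp

-- The zip-fold fill produces the run-start table (positions below off untouched).
theorem fold_fill_eq (values : List Int) : ∀ (off : Nat) (so : List Nat),
    so.length = off + values.length →
    ((runStarts off values).zip ((runStarts off values).drop 1 ++ [so.length])).foldl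
        (fun so (p : Nat × Nat) =>
          (List.range' p.1 (p.2 - p.1)).foldl (fun so i => so.set i p.1) so) so
      = so.take off ++ stOf off values := by
  induction hl : values.length using Nat.strong_induction_on generalizing values with
  | _ n ih =>
    subst hl
    intro off so hlen
    cases values with
    | nil =>
      simp only [runStarts_nil, stOf_nil, List.drop_nil, List.nil_append,
        List.zip_nil_left, List.foldl_nil, List.append_nil]
      simp only [List.length_nil, Nat.add_zero] at hlen
      rw [List.take_of_length_le (le_of_eq hlen)]
    | cons v rest =>
      simp only [List.length_cons] at hlen
      set k := (rest.takeWhile (fun w => w == v)).length with hk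
      set rest' := rest.dropWhile (fun w => w == v) with hrest'
      have hkr : k + rest'.length = rest.length := by
        rw [hk, hrest']
        rw [← List.length_append, List.takeWhile_append_dropWhile]
      set off' := off + 1 + k with hoff'
      rw [runStarts_cons, stOf_cons, ← hk, ← hrest', ← hoff']
      cases hcase : runStarts off' rest' with
      | nil =>
        have hre : rest' = [] := (runStarts_eq_nil_iff _ _).mp hcase
        rw [hre, stOf_nil, List.append_nil]
        simp only [List.zip_cons_cons, List.drop_succ_cons, List.drop_nil,
          List.nil_append, List.zip_nil_left, List.foldl_cons, List.foldl_nil]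
        have hr0 : rest.length = k := by
          rw [hre] at hkr; simp at hkr; omega
        have hn : so.length = off + (1 + k) := by omega
        have hfill := fill_eq (1 + k) so off off (by omega)
        rw [show so.length - off = 1 + k by omega, hfill]
        rw [List.drop_of_length_le (by omega), List.append_nil]
      | cons s2 tl =>
        have hre : rest' ≠ [] := by
          intro h; rw [h, runStarts_nil] at hcase; exact absurd hcase (by simp)
        have hs2 : s2 = off' := by
          cases hr : rest' with
          | nil => exact absurd hr hre
          | cons w ws =>
            rw [hr, runStarts_cons] at hcase
            exact (List.cons_eq_cons.mp hcase).1.symm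
        subst hs2
        simp only [List.zip_cons_cons, List.drop_succ_cons, List.drop_zero, List.cons_append, List.foldl_cons]
        have hso'len : off + (1 + k) ≤ so.length := by omega
        have hfill := fill_eq (1 + k) so off off (by omega)
        rw [show off' - off = 1 + k by omega, hfill]
        set so' := so.take off ++ List.replicate (1 + k) off ++ so.drop (off + (1 + k)) with hso'
        have hso'len2 : so'.length = so.length := by
          rw [hso']; simp; omega
        have hlen' : so'.length = off' + rest'.length := by
          rw [hso'len2]; omega
        have hlt : rest'.length < (v :: rest).length := by simp; omega
        have hih := ih rest'.length hlt rest' rfl off' so' hlen'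
        rw [hcase] at hih
        simp only [List.drop_succ_cons, List.drop_zero] at hih
        rw [← hso'len2, hih]
        have htk : (so.take off).length = off := by simp; omega
        have htake : so'.take off' = so.take off ++ List.replicate (1 + k) off := by
          have e1 : so'.take off' = (so.take off).take off'
              ++ (List.replicate (1 + k) off ++ so.drop (off + (1 + k))).take (off' - off) := by
            rw [hso', List.append_assoc, List.take_append, htk]
          have e2 : (so.take off).take off' = so.take off :=
            List.take_of_length_le (by rw [htk]; omega)
          have e3 : (List.replicate (1 + k) off ++ so.drop (off + (1 + k))).take (off' - off)
              = (List.replicate (1 + k) off).take (off' - off)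
                ++ (so.drop (off + (1 + k))).take (off' - off - (1 + k)) := by
            rw [List.take_append, List.length_replicate]
          have e4 : (List.replicate (1 + k) off).take (off' - off) = List.replicate (1 + k) off :=
            List.take_of_length_le (by rw [List.length_replicate]; omega)
          have e5 : off' - off - (1 + k) = 0 := by omega
          rw [e1, e2, e3, e4, e5, List.take_zero, List.append_nil]
        rw [htake, List.append_assoc]

-- Final pass: i - start_of[i] over the run-start table yields runsF.
theorem map_sub_stOf (values : List Int) : ∀ (off : Nat) (pre : List Nat),
    pre.length = off →
    (List.range' off values.length).map
        (fun (i : Nat) => (i : Int) - (((pre ++ stOf off values).getD i 0 : Nat) : Int))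
      = runsF values := by
  induction hl : values.length using Nat.strong_induction_on generalizing values with
  | _ n ih =>
    subst hl
    intro off pre hpre
    cases values with
    | nil => simp [runsF_nil]
    | cons v rest =>
      set k := (rest.takeWhile (fun w => w == v)).length with hk
      set rest' := rest.dropWhile (fun w => w == v) with hrest'
      have hkr : k + rest'.length = rest.length := by
        rw [hk, hrest']; rw [← List.length_append, List.takeWhile_append_dropWhile]
      rw [runsF_cons, ← hk, ← hrest', stOf_cons, ← hk, ← hrest']
      have hsplit : List.range' off (v :: rest).length
          = List.range' off (1 + k) ++ List.range' (off + (1 + k)) rest'.length := by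
        rw [show (v :: rest).length = (1 + k) + rest'.length by simp; omega,
          ← List.range'_append]
        norm_num
      rw [hsplit, List.map_append]
      congr 1
      · -- head run: indices off..off+k, table value off
        have hgd : ∀ i ∈ List.range' off (1 + k),
            ((pre ++ (List.replicate (1 + k) off ++ stOf (off + 1 + k) rest')).getD i 0) = off := by
          intro i hi
          obtain ⟨h1, h2⟩ := List.mem_range'_1.mp hi
          rw [List.getD_eq_getElem?_getD, List.getElem?_append_right (by omega),
            List.getElem?_append_left (by simp; omega), List.getElem?_replicate,
            if_pos (by simp [hpre]; omega)]
          rfl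
        rw [List.map_congr_left (fun i hi => by rw [hgd i hi])]
        rw [List.range'_eq_map_range, List.map_map]
        apply List.map_congr_left
        intro i _
        simp only [Function.comp, Int.ofNat_eq_natCast]
        push_cast
        ring
      · -- tail: recurse with pre extended by the replicate block
        have h1 : pre ++ (List.replicate (1 + k) off ++ stOf (off + 1 + k) rest')
            = (pre ++ List.replicate (1 + k) off) ++ stOf (off + 1 + k) rest' := by simp
        have h2 : (pre ++ List.replicate (1 + k) off).length = off + (1 + k) := by
          simp [hpre]
        have hlt : rest'.length < (v :: rest).length := by simp; omega
        have hih := ih rest'.length hlt rest' rfl (off + (1 + k))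
          (pre ++ List.replicate (1 + k) off) h2
        rw [h1, show off + 1 + k = off + (1 + k) by ring]
        exact hih

theorem portB_runs (values : List Int) : compute_durations_py_alt values = runsF values := by
  show (List.range values.length).map _ = _
  rw [starts_eq]
  have h := fold_fill_eq values 0 (List.replicate values.length (0 : Nat)) (by simp)
  simp only [List.length_replicate, List.take_zero, List.nil_append] at h
  rw [h]
  simpa [List.range_eq_range'] using map_sub_stOf values 0 [] rfl

-- ===== VERDICT (by name: the statement is the Claim_ definition above) =====
theorem compute_durations_py_spec : Claim_equal_compute_durations_py := by
  intro values _
  unfold Spec_compute_durations_py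
  rw [portA_runs, portB_runs]
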